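-- pv_equiv track=rewrite | github.com/NicXVII/enigmaZ3 | cracker/full_cracker.py | _iter_rotor_orders
-- ===== SOURCE A (Python) =====
-- import itertools
--
-- def _iter_rotor_orders(
--     rotor_pool: tuple[str, ...],
--     search_rotor_order: bool,
-- ):
--     if search_rotor_order:
--         for order in itertools.permutations(rotor_pool, 3):
--             yield order
--     else:
--         if len(rotor_pool) != 3:
--             raise ValueError("rotor_pool must contain exactly 3 rotors when search_rotor_order=False")
--         yield (rotor_pool[0], rotor_pool[1], rotor_pool[2])
-- ===== SOURCE B (Python) =====
-- def _iter_rotor_orders(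
--     rotor_pool: tuple[str, ...],
--     search_rotor_order: bool,
-- ):
--     if search_rotor_order:
--         # Enumerate the full n^3 index cube with a single counter and reject
--         # triples that reuse an index; lexicographic decoding reproduces
--         # itertools.permutations' order exactly.
--         n = len(rotor_pool)
--         for m in range(n * n * n):
--             i, j, k = m // (n * n), (m // n) % n, m % n
--             if i != j and j != k and i != k:
--                 yield (rotor_pool[i], rotor_pool[j], rotor_pool[k])
--     else:
--         if len(rotor_pool) != 3:
--             raise ValueError("rotor_pool must contain exactly 3 rotors when search_rotor_order=False")
--         yield (rotor_pool[0], rotor_pool[1], rotor_pool[2])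
-- ===== Notes on version B (the rewrite author's own statement) =====
-- stated objective: alternative
-- what changed: Replaces direct permutation generation via itertools.permutations with a single flat loop over one counter m in range(n^3), arithmetically decoding (i,j,k) by div/mod and rejecting triples with a repeated index (generate-and-filter over the index cube instead of selection without repetition).
import Mathlib
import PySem

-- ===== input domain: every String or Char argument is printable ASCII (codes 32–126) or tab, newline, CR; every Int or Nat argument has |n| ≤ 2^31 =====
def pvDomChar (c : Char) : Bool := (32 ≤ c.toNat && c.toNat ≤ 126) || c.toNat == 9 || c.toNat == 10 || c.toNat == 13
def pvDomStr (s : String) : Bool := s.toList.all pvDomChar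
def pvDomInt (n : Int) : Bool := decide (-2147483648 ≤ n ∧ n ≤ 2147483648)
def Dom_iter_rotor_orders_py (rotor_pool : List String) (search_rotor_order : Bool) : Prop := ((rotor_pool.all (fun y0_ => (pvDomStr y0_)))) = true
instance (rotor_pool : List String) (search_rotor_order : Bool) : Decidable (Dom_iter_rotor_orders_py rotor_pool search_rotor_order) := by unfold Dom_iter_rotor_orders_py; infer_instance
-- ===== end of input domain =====

-- B enumerates the whole n^3 index cube with one counter decoded by div/mod and
-- filters out repeated indices, instead of itertools' direct permutation
-- generation (objective: alternative; same order, same outputs).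
-- Both Pythons are generators; equivalence is about the list of yielded tuples.

-- ===== PORT A =====
-- itertools.permutations(pool, 3) is a library call; it is ported by the standard
-- recursive selection enumeration, which yields r-permutations in exactly
-- itertools' order (lexicographic by position indices).
def pvSel (xs : List String) : List (String × List String) :=
  match xs with
  | [] => []
  | a :: t => (a, t) :: (pvSel t).map (fun p => (p.1, a :: p.2))

def pyPerms3 (xs : List String) : List (String × String × String) :=
  (pvSel xs).flatMap (fun p =>
    (pvSel p.2).flatMap (fun q =>
      (pvSel q.2).map (fun r => (p.1, q.1, r.1))))

def iter_rotor_orders_py (rotor_pool : List String) (search_rotor_order : Bool) :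
    List (String × String × String) :=
  if search_rotor_order then
    pyPerms3 rotor_pool
  else
    if rotor_pool.length ≠ 3 then []  -- Python raises ValueError here; excluded by Pre_
    else [(rotor_pool.getD 0 "", rotor_pool.getD 1 "", rotor_pool.getD 2 "")]

-- ===== PORT B =====
def iter_rotor_orders_py_alt (rotor_pool : List String) (search_rotor_order : Bool) :
    List (String × String × String) :=
  if search_rotor_order then
    let n := rotor_pool.length
    (List.range (n * n * n)).flatMap (fun m =>
      let i := m / (n * n)
      let j := (m / n) % n
      let k := m % n
      if i ≠ j ∧ j ≠ k ∧ i ≠ k then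
        [(rotor_pool.getD i "", rotor_pool.getD j "", rotor_pool.getD k "")]
      else [])
  else
    if rotor_pool.length ≠ 3 then []  -- Python raises ValueError here; excluded by Pre_
    else [(rotor_pool.getD 0 "", rotor_pool.getD 1 "", rotor_pool.getD 2 "")]

-- ===== PRECONDITION & SPEC =====
-- With search_rotor_order=False and len(rotor_pool) ≠ 3 both Pythons raise ValueError.
def Pre_iter_rotor_orders_py (rotor_pool : List String) (search_rotor_order : Bool) : Prop :=
  search_rotor_order = true ∨ rotor_pool.length = 3
instance (rotor_pool : List String) (search_rotor_order : Bool) : Decidable (Pre_iter_rotor_orders_py rotor_pool search_rotor_order) := by unfold Pre_iter_rotor_orders_py; infer_instance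

def pvWitness_iter_rotor_orders_py : List String × Bool := (["I", "II", "III"], false)

def Spec_iter_rotor_orders_py (rotor_pool : List String) (search_rotor_order : Bool) (out : List (String × String × String)) : Prop := out = iter_rotor_orders_py_alt rotor_pool search_rotor_order
instance (rotor_pool : List String) (search_rotor_order : Bool) (out : List (String × String × String)) : Decidable (Spec_iter_rotor_orders_py rotor_pool search_rotor_order out) := by unfold Spec_iter_rotor_orders_py; infer_instance

-- ===== CLAIM (what is proved, stated in full; the proofs are below) =====
def Claim_equal_iter_rotor_orders_py : Prop := ∀ (rotor_pool : List String) (search_rotor_order : Bool), Dom_iter_rotor_orders_py rotor_pool search_rotor_order → Pre_iter_rotor_orders_py rotor_pool search_rotor_order → Spec_iter_rotor_orders_py rotor_pool search_rotor_order (iter_rotor_orders_py rotor_pool search_rotor_order)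

-- ===== LEMMAS AND PROOFS =====

-- the monotone embedding of {0,…,n-2} into {0,…,n-1} \ {i}
def pvShift (i j : ℕ) : ℕ := if j < i then j else j + 1

theorem pvShift_ne (i j : ℕ) : pvShift i j ≠ i := by
  unfold pvShift; split_ifs <;> omega

theorem pvSel_eq (xs : List String) :
    pvSel xs = (List.range xs.length).map (fun i => (xs.getD i "", xs.eraseIdx i)) := by
  induction xs with
  | nil => simp [pvSel]
  | cons a t ih =>
    simp only [pvSel, ih, List.length_cons, List.range_succ_eq_map, List.map_map,
      List.map_cons]
    refine congrArg₂ List.cons (by simp) ?_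
    apply List.map_congr_left
    intro i _
    simp [Nat.succ_eq_add_one, List.eraseIdx_cons_succ]

theorem flatMap_range_skip {β : Type} (n i : ℕ) (hi : i < n) (g : ℕ → List β) :
    (List.range n).flatMap (fun j => if j = i then [] else g j)
      = (List.range (n - 1)).flatMap (fun j => g (pvShift i j)) := by
  obtain ⟨m, rfl⟩ : ∃ m, n = i + 1 + m := ⟨n - (i + 1), by omega⟩
  have hn1 : i + 1 + m - 1 = i + m := by omega
  have e1 : List.range (i + 1 + m)
      = (List.range i ++ [i]) ++ List.map (fun x => i + 1 + x) (List.range m) := by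
    rw [List.range_add, List.range_succ]
  have e2 : List.range (i + m) = List.range i ++ List.map (fun x => i + x) (List.range m) :=
    List.range_add
  rw [hn1, e1, e2, List.flatMap_append, List.flatMap_append, List.flatMap_append,
    List.flatMap_map, List.flatMap_map]
  have hmid : List.flatMap (fun j => if j = i then ([] : List β) else g j) [i] = [] := by
    rw [List.flatMap_cons, if_pos rfl, List.flatMap_nil, List.nil_append]
  rw [hmid, List.append_nil]
  congr 1
  · apply List.flatMap_congr; intro j hj
    rw [List.mem_range] at hj
    rw [if_neg (by omega)]
    unfold pvShift
    rw [if_pos hj]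
  · apply List.flatMap_congr; intro x _
    rw [if_neg (by omega)]
    unfold pvShift
    rw [if_neg (by omega)]
    congr 1; omega

theorem flatMap_range_skip2' {β : Type} (n m M : ℕ) (hM : M < n) (hmM : m < M)
    (h : ℕ → List β) :
    (List.range n).flatMap (fun k => if k = m ∨ k = M then [] else h k)
      = (List.range (n - 2)).flatMap (fun k => h (pvShift M (pvShift m k))) := by
  have h1 : (fun k => if k = m ∨ k = M then ([] : List β) else h k)
      = (fun k => if k = M then [] else if k = m then [] else h k) := by
    funext k; split_ifs <;> tauto
  rw [h1, flatMap_range_skip n M hM]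
  have h2 : (fun j => if pvShift M j = m then ([] : List β) else h (pvShift M j))
      = (fun j => if j = m then [] else h (pvShift M j)) := by
    funext j
    by_cases hj : j = m
    · subst hj
      rw [if_pos (by unfold pvShift; rw [if_pos hmM]), if_pos rfl]
    · rw [if_neg (by unfold pvShift; split_ifs <;> omega), if_neg hj]
  rw [h2, flatMap_range_skip (n - 1) m (by omega)]
  have h3 : n - 1 - 1 = n - 2 := by omega
  rw [h3]

theorem flatMap_range_skip2 {β : Type} (n a b : ℕ) (ha : a < n) (hb : b < n)
    (hab : a ≠ b) (h : ℕ → List β) :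
    (List.range n).flatMap (fun k => if k = a ∨ k = b then [] else h k)
      = (List.range (n - 2)).flatMap (fun k => h (pvShift (max a b) (pvShift (min a b) k))) := by
  rcases Nat.lt_or_ge a b with hlt | hge
  · rw [Nat.max_eq_right (le_of_lt hlt), Nat.min_eq_left (le_of_lt hlt)]
    exact flatMap_range_skip2' n a b hb hlt h
  · have hlt : b < a := by omega
    rw [Nat.max_eq_left (le_of_lt hlt), Nat.min_eq_right (le_of_lt hlt)]
    have h1 : (fun k => if k = a ∨ k = b then ([] : List β) else h k)
        = (fun k => if k = b ∨ k = a then [] else h k) := by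
      funext k; split_ifs <;> tauto
    rw [h1]
    exact flatMap_range_skip2' n b a ha hlt h

theorem getD_eraseIdx (xs : List String) (i j : ℕ) (hj : j < (xs.eraseIdx i).length) :
    (xs.eraseIdx i).getD j "" = xs.getD (pvShift i j) "" := by
  rw [List.getD_eq_getElem _ _ hj, List.getElem_eraseIdx]
  have hlen : (xs.eraseIdx i).length ≤ xs.length := List.length_eraseIdx_le _ _
  unfold pvShift
  by_cases hji : j < i
  · rw [dif_pos hji, if_pos hji, List.getD_eq_getElem _ _ (by omega)]
  · rw [dif_neg hji, if_neg hji, List.getD_eq_getElem]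

theorem pvShift_comp (i j k : ℕ) :
    pvShift i (pvShift j k) = pvShift (max i (pvShift i j)) (pvShift (min i (pvShift i j)) k) := by
  unfold pvShift
  split_ifs <;> omega

-- A's permutation enumeration, characterised as three nested index loops with skips
theorem perms3_eq (xs : List String) :
    pyPerms3 xs =
      (List.range xs.length).flatMap (fun i =>
        (List.range xs.length).flatMap (fun j =>
          if j = i then [] else
            (List.range xs.length).flatMap (fun k =>
              if k = i ∨ k = j then [] else
                [(xs.getD i "", xs.getD j "", xs.getD k "")]))) := by
  rw [pyPerms3, pvSel_eq, List.flatMap_map]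
  apply List.flatMap_congr
  intro i hi
  rw [List.mem_range] at hi
  rw [flatMap_range_skip xs.length i hi]
  rw [pvSel_eq, List.flatMap_map,
    List.length_eraseIdx_of_lt hi]
  apply List.flatMap_congr
  intro j' hj'
  rw [List.mem_range] at hj'
  have hj'len : j' < (xs.eraseIdx i).length := by
    rw [List.length_eraseIdx_of_lt hi]; exact hj'
  have hshift_lt : pvShift i j' < xs.length := by
    unfold pvShift; split_ifs <;> omega
  rw [flatMap_range_skip2 xs.length i (pvShift i j') hi hshift_lt
    (Ne.symm (pvShift_ne i j'))]
  rw [pvSel_eq, List.map_map,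
    List.length_eraseIdx_of_lt hj'len, List.length_eraseIdx_of_lt hi]
  have hsingle : ∀ (f : ℕ → String × String × String) (l : List ℕ),
      l.flatMap (fun k => [f k]) = l.map f := by
    intro f l; induction l with
    | nil => rfl
    | cons x t ih => simp [List.flatMap_cons, ih]
  rw [hsingle]
  apply List.map_congr_left
  intro k'' hk''
  rw [List.mem_range] at hk''
  simp only [Function.comp]
  have hk''len : k'' < ((xs.eraseIdx i).eraseIdx j').length := by
    rw [List.length_eraseIdx_of_lt hj'len, List.length_eraseIdx_of_lt hi]; exact hk''
  have hsk : pvShift j' k'' < (xs.eraseIdx i).length := by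
    rw [List.length_eraseIdx_of_lt hi]
    unfold pvShift; split_ifs <;> omega
  rw [getD_eraseIdx xs i j' hj'len,
    getD_eraseIdx _ j' k'' hk''len, getD_eraseIdx xs i _ hsk,
    ← pvShift_comp]

-- splitting a flat counter range into two nested ranges
theorem range_mul_flatMap {β : Type} (a b : ℕ) (f : ℕ → List β) :
    (List.range (a * b)).flatMap f
      = (List.range a).flatMap (fun i => (List.range b).flatMap (fun j => f (i * b + j))) := by
  induction a with
  | zero => simp
  | succ a ih =>
    have hm : (a + 1) * b = a * b + b := by ring
    rw [hm, List.range_add, List.flatMap_append, ih, List.range_succ,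
      List.flatMap_append, List.flatMap_map]
    simp [List.flatMap_cons]

-- decoding the flat counter reproduces the three nested loops
theorem cube_decode {β : Type} (n : ℕ) (g : ℕ → ℕ → ℕ → List β) :
    (List.range (n * n * n)).flatMap (fun m => g (m / (n * n)) ((m / n) % n) (m % n))
      = (List.range n).flatMap (fun i =>
          (List.range n).flatMap (fun j =>
            (List.range n).flatMap (fun k => g i j k))) := by
  rw [range_mul_flatMap (n * n) n, range_mul_flatMap n n]
  apply List.flatMap_congr; intro i hi
  apply List.flatMap_congr; intro j hj
  apply List.flatMap_congr; intro k hk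
  rw [List.mem_range] at hi hj hk
  have hn : 0 < n := by omega
  have hm : (i * n + j) * n + k = i * (n * n) + (j * n + k) := by ring
  have hdiv : ((i * n + j) * n + k) / n = i * n + j := by
    rw [mul_comm (i * n + j) n, Nat.mul_add_div hn, Nat.div_eq_of_lt hk, Nat.add_zero]
  have h1 : ((i * n + j) * n + k) % n = k := by
    rw [mul_comm (i * n + j) n, Nat.mul_add_mod, Nat.mod_eq_of_lt hk]
  have h2 : (((i * n + j) * n + k) / n) % n = j := by
    rw [hdiv, mul_comm i n, Nat.mul_add_mod, Nat.mod_eq_of_lt hj]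
  have h3 : ((i * n + j) * n + k) / (n * n) = i := by
    rw [← Nat.div_div_eq_div_mul, hdiv, mul_comm i n, Nat.mul_add_div hn,
      Nat.div_eq_of_lt hj, Nat.add_zero]
  rw [h1, h2, h3]

-- the skip tests of the nested form coincide with B's single distinctness guard
theorem nested_guard_eq (xs : List String) :
    (List.range xs.length).flatMap (fun i =>
      (List.range xs.length).flatMap (fun j =>
        if j = i then [] else
          (List.range xs.length).flatMap (fun k =>
            if k = i ∨ k = j then [] else
              [(xs.getD i "", xs.getD j "", xs.getD k "")])))
    = (List.range xs.length).flatMap (fun i =>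
        (List.range xs.length).flatMap (fun j =>
          (List.range xs.length).flatMap (fun k =>
            if i ≠ j ∧ j ≠ k ∧ i ≠ k then
              [(xs.getD i "", xs.getD j "", xs.getD k "")]
            else []))) := by
  apply List.flatMap_congr; intro i _
  apply List.flatMap_congr; intro j _
  by_cases hji : j = i
  · subst hji
    simp
  · rw [if_neg hji]
    apply List.flatMap_congr; intro k _
    by_cases hk : k = i ∨ k = j
    · rw [if_pos hk, if_neg (by tauto)]
    · rw [if_neg hk, if_pos (by tauto)]

-- ===== VERDICT (by name: the statement is the Claim_ definition above) =====
theorem iter_rotor_orders_py_spec : Claim_equal_iter_rotor_orders_py := by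
  intro rotor_pool search_rotor_order _ hpre
  unfold Spec_iter_rotor_orders_py iter_rotor_orders_py iter_rotor_orders_py_alt
  cases search_rotor_order with
  | true =>
    simp only [if_true]
    rw [perms3_eq, nested_guard_eq, ← cube_decode]
  | false =>
    rcases hpre with hpre | hpre
    · exact absurd hpre (by simp)
    · simp [hpre]
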